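-- pv_equiv track=rewrite | github.com/PoutineSyropErable/AutoMakeJava | mysrc/analyse_java_file.py | find_file_dependencies
-- ===== SOURCE A (Python) =====
-- def find_file_dependencies(java_file_path, imports, method_calls):
--     """
--     Determines file dependencies for a given Java file based on method calls
--     and imports.
--
--     Args:
--         java_file_path (str): Path to the Java file.
--         imports (list): List of imported packages or classes in the file.
--         method_calls (list): List of tuples with (caller, method) for method calls.
--
--     Returns:
--         dict: A mapping of called classes to the imported packages or files they map to.
--     """
--     # Mapping dependencies
--     dependencies = {}
--
--     # For each method call, try to map it to an imported file or class
--     for caller, method in method_calls: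
--         if caller != "unknown (local or implicit)":
--             # Find the corresponding import
--             matching_imports = [imp for imp in imports if caller in imp.split(".")]
--             dependencies[caller] = (
--                 matching_imports if matching_imports else ["Unknown Source"]
--             )
--
--     return dependencies
-- ===== SOURCE B (Python) =====
-- def find_file_dependencies(java_file_path, imports, method_calls):
--     # Import-driven single pass: collect valid callers first, then scan imports once,
--     # crediting each import to every (deduped) dotted token that is a valid caller.
--     deps = {}
--     for caller, _method in method_calls:
--         if caller != "unknown (local or implicit)":
--             deps.setdefault(caller, [])
--     for imp in imports:
--         for tok in dict.fromkeys(imp.split(".")):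
--             if tok in deps:
--                 deps[tok].append(imp)
--     return {c: (lst if lst else ["Unknown Source"]) for c, lst in deps.items()}
-- ===== Notes on version B (the rewrite author's own statement) =====
-- stated objective: faster
-- what changed: B inverts the loop structure: instead of rescanning all imports for every method call (and recomputing entries for duplicate callers), it seeds a dict with the valid callers once, makes a single pass over imports crediting each import to every deduped dotted token that is a caller key, and fills 'Unknown Source' defaults at the end.
import Mathlib
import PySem

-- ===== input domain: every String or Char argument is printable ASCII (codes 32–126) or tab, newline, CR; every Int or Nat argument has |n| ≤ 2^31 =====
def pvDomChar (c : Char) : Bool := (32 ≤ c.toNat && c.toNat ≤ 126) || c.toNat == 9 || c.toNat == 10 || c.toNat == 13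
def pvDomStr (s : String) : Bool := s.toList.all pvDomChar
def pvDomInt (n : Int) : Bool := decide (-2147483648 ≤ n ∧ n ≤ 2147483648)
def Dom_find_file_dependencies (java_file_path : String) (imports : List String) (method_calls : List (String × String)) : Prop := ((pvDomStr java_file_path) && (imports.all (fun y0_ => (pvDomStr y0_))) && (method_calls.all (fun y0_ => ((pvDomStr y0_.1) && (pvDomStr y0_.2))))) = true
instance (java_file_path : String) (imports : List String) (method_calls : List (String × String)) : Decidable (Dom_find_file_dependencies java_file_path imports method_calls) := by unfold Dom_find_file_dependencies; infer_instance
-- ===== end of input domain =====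

-- B replaces A's per-caller rescan of all imports by one import-driven pass over a
-- precomputed caller dict (objective: faster — one pass over imports instead of one per call).

-- ===== PORT A =====
-- literal port of A: for each method call, filter ALL imports for the caller, insert into the dict
def find_file_dependencies (java_file_path : String) (imports : List String) (method_calls : List (String × String)) : List (String × List String) :=
  (method_calls.foldl
    (fun (dependencies : PySem.Dict String (List String)) cm =>
      if cm.1 != "unknown (local or implicit)" then
        let matching_imports := imports.filter (fun imp => ((PySem.Str.split? imp ".").getD []).contains cm.1)
        dependencies.insert cm.1 (if matching_imports.isEmpty then ["Unknown Source"] else matching_imports)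
      else dependencies)
    PySem.Dict.empty).items

-- ===== PORT B =====
-- literal port of B: seed the dict with empty lists per valid caller, one pass over imports
-- crediting each import to every deduped dotted token that is a key, then fill defaults
def find_file_dependencies_alt (java_file_path : String) (imports : List String) (method_calls : List (String × String)) : List (String × List String) :=
  let deps0 := method_calls.foldl
    (fun (deps : PySem.Dict String (List String)) cm =>
      if cm.1 != "unknown (local or implicit)" then deps.setdefault cm.1 [] else deps)
    PySem.Dict.empty
  let deps := imports.foldl
    (fun (deps : PySem.Dict String (List String)) imp =>
      (PySem.List.dedup ((PySem.Str.split? imp ".").getD [])).foldl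
        (fun deps tok =>
          if deps.contains tok then deps.insert tok (deps.getD tok [] ++ [imp]) else deps)
        deps)
    deps0
  deps.items.map (fun p => (p.1, if p.2.isEmpty then ["Unknown Source"] else p.2))

-- ===== PRECONDITION & SPEC =====
def Spec_find_file_dependencies (java_file_path : String) (imports : List String) (method_calls : List (String × String)) (out : List (String × List String)) : Prop := out = find_file_dependencies_alt java_file_path imports method_calls
instance (java_file_path : String) (imports : List String) (method_calls : List (String × String)) (out : List (String × List String)) : Decidable (Spec_find_file_dependencies java_file_path imports method_calls out) := by unfold Spec_find_file_dependencies; infer_instance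

-- ===== CLAIM (what is proved, stated in full; the proofs are below) =====
def Claim_equal_find_file_dependencies : Prop := ∀ (java_file_path : String) (imports : List String) (method_calls : List (String × String)), Dom_find_file_dependencies java_file_path imports method_calls → Spec_find_file_dependencies java_file_path imports method_calls (find_file_dependencies java_file_path imports method_calls)

-- ===== LEMMAS AND PROOFS =====

lemma innerB (imp : String) :
    ∀ (ts : List String) (d : PySem.Dict String (List String)), ts.Nodup → d.keys.Nodup →
    ((ts.foldl
      (fun deps tok =>
        if PySem.Dict.contains deps tok then deps.insert tok (deps.getD tok [] ++ [imp]) else deps) d).items)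
    = d.items.map (fun p => if ts.contains p.1 then (p.1, p.2 ++ [imp]) else p) := by
  intro ts
  induction ts with
  | nil => intro d _ _; simp
  | cons tok ts ih =>
    intro d hnd hkd
    rcases List.nodup_cons.mp hnd with ⟨htok, hts⟩
    simp only [List.foldl_cons]
    by_cases hc : PySem.Dict.contains d tok = true
    · rw [if_pos hc]
      have hk' : (d.insert tok (d.getD tok [] ++ [imp])).keys.Nodup := by
        rw [PySem.Dict.keys_insert_of_contains d _ hc]; exact hkd
      rw [ih _ hts hk', PySem.Dict.items_insert_of_contains d _ hc, List.map_map]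
      apply List.map_congr_left
      intro p hp
      by_cases h : p.1 = tok
      · have hpe : (tok, p.2) ∈ d.items := by rw [← h]; exact hp
        have hget : d.getD tok [] = p.2 := PySem.Dict.getD_of_mem_items d hpe hkd []
        simp [Function.comp, h, hget]
        exact htok
      · have hb : (p.1 == tok) = false := by simp [h]
        simp [Function.comp, hb, h]
    · rw [if_neg hc]
      rw [ih _ hts hkd]
      apply List.map_congr_left
      intro p hp
      have hpk : p.1 ∈ PySem.Dict.keys d := PySem.Dict.mem_keys_of_mem_items d hp
      have h : p.1 ≠ tok := by
        intro he; exact (by simpa [hc] using (PySem.Dict.contains_iff_mem_keys d tok).mpr (he ▸ hpk))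
      have hb : (p.1 == tok) = false := by simp [h]
      simp [h]

lemma phase2 :
    ∀ (imps : List String) (d : PySem.Dict String (List String)), d.keys.Nodup →
    ((imps.foldl
      (fun (deps : PySem.Dict String (List String)) imp =>
        (PySem.List.dedup ((PySem.Str.split? imp ".").getD [])).foldl
          (fun deps tok =>
            if PySem.Dict.contains deps tok then deps.insert tok (deps.getD tok [] ++ [imp]) else deps)
          deps) d).items)
    = d.items.map (fun p => (p.1, p.2 ++ imps.filter (fun imp => ((PySem.Str.split? imp ".").getD []).contains p.1))) := by
  intro imps
  induction imps with
  | nil => intro d _; simp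
  | cons imp imps ih =>
    intro d hkd
    simp only [List.foldl_cons]
    have hts : (PySem.List.dedup ((PySem.Str.split? imp ".").getD [])).Nodup :=
      PySem.List.nodup_dedup _
    have hin := innerB imp (PySem.List.dedup ((PySem.Str.split? imp ".").getD [])) d hts hkd
    have hkeys : ((PySem.List.dedup ((PySem.Str.split? imp ".").getD [])).foldl
          (fun deps tok =>
            if PySem.Dict.contains deps tok then deps.insert tok (deps.getD tok [] ++ [imp]) else deps)
          d).keys = d.keys := by
      simp only [PySem.Dict.keys, hin, List.map_map]
      apply List.map_congr_left
      intro p hp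
      by_cases h : p.1 ∈ (PySem.Str.split? imp ".").getD [] <;> simp [Function.comp, h]
    rw [ih _ (by rw [hkeys]; exact hkd), hin, List.map_map]
    apply List.map_congr_left
    intro p hp
    by_cases h : p.1 ∈ (PySem.Str.split? imp ".").getD [] <;>
      simp [Function.comp, h]

def pvM (imports : List String) (c : String) : List String :=
  let m := imports.filter (fun imp => ((PySem.Str.split? imp ".").getD []).contains c)
  if m.isEmpty then ["Unknown Source"] else m

lemma phase1 :
    ∀ (mc : List (String × String)) (ks : List String) (d : PySem.Dict String (List String)),
    d.items = ks.map (fun c => (c, ([] : List String))) → ks.Nodup →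
    (mc.foldl
      (fun (deps : PySem.Dict String (List String)) cm =>
        if cm.1 != "unknown (local or implicit)" then deps.setdefault cm.1 [] else deps) d).items
    = (PySem.Set.update ks ((mc.map Prod.fst).filter (fun c => c != "unknown (local or implicit)"))).map
        (fun c => (c, ([] : List String))) := by
  intro mc
  induction mc with
  | nil => intro ks d hd hnd; simpa [PySem.Set.update] using hd
  | cons cm mc ih =>
    intro ks d hd hnd
    simp only [List.foldl_cons, List.map_cons, List.filter_cons]
    have hkeys : d.keys = ks := by
      simp only [PySem.Dict.keys, hd, List.map_map]
      exact List.map_id ks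
    by_cases hv : (cm.1 != "unknown (local or implicit)") = true
    · rw [if_pos hv, if_pos hv]
      by_cases hm : cm.1 ∈ ks
      · have hc : d.contains cm.1 = true :=
          (PySem.Dict.contains_iff_mem_keys d _).mpr (hkeys ▸ hm)
        rw [PySem.Dict.setdefault_of_contains d _ hc, ih ks d hd hnd]
        simp [PySem.Set.update, PySem.Set.add, hm]
      · have hc : d.contains cm.1 = false := by
          rw [← Bool.not_eq_true]
          simp [PySem.Dict.contains_iff_mem_keys, hkeys, hm]
        rw [PySem.Dict.setdefault_of_not_contains d _ hc]
        have hd' : (d.insert cm.1 []).items = (ks ++ [cm.1]).map (fun c => (c, ([] : List String))) := by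
          rw [PySem.Dict.items_insert_of_not_contains d _ hc, hd]; simp
        have hnd' : (ks ++ [cm.1]).Nodup := by
          simp [List.nodup_append, hnd]
          intro a ha he
          exact hm (he ▸ ha)
        rw [ih (ks ++ [cm.1]) _ hd' hnd']
        simp [PySem.Set.update, PySem.Set.add, hm]
    · rw [if_neg hv, if_neg hv]
      exact ih ks d hd hnd

lemma phaseA (imports : List String) :
    ∀ (mc : List (String × String)) (ks : List String) (d : PySem.Dict String (List String)),
    d.items = ks.map (fun c => (c, pvM imports c)) → ks.Nodup →
    (mc.foldl
      (fun (dependencies : PySem.Dict String (List String)) cm =>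
        if cm.1 != "unknown (local or implicit)" then
          let matching_imports := imports.filter (fun imp => ((PySem.Str.split? imp ".").getD []).contains cm.1)
          dependencies.insert cm.1 (if matching_imports.isEmpty then ["Unknown Source"] else matching_imports)
        else dependencies) d).items
    = (PySem.Set.update ks ((mc.map Prod.fst).filter (fun c => c != "unknown (local or implicit)"))).map
        (fun c => (c, pvM imports c)) := by
  intro mc
  induction mc with
  | nil => intro ks d hd hnd; simpa [PySem.Set.update] using hd
  | cons cm mc ih =>
    intro ks d hd hnd
    simp only [List.foldl_cons, List.map_cons, List.filter_cons]
    have hkeys : d.keys = ks := by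
      simp only [PySem.Dict.keys, hd, List.map_map]
      exact List.map_id ks
    by_cases hv : (cm.1 != "unknown (local or implicit)") = true
    · rw [if_pos hv, if_pos hv]
      by_cases hm : cm.1 ∈ ks
      · have hc : d.contains cm.1 = true :=
          (PySem.Dict.contains_iff_mem_keys d _).mpr (hkeys ▸ hm)
        have hd' : (d.insert cm.1
            (if (imports.filter (fun imp => ((PySem.Str.split? imp ".").getD []).contains cm.1)).isEmpty
             then ["Unknown Source"]
             else imports.filter (fun imp => ((PySem.Str.split? imp ".").getD []).contains cm.1))).items
            = ks.map (fun c => (c, pvM imports c)) := by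
          rw [PySem.Dict.items_insert_of_contains d _ hc, hd, List.map_map]
          apply List.map_congr_left
          intro c hcm
          by_cases he : c = cm.1
          · simp [Function.comp, he, pvM]
          · simp [Function.comp, he]
        rw [ih ks _ hd' hnd]
        simp [PySem.Set.update, PySem.Set.add, hm]
      · have hc : d.contains cm.1 = false := by
          rw [← Bool.not_eq_true]
          simp [PySem.Dict.contains_iff_mem_keys, hkeys, hm]
        have hd' : (d.insert cm.1
            (if (imports.filter (fun imp => ((PySem.Str.split? imp ".").getD []).contains cm.1)).isEmpty
             then ["Unknown Source"]
             else imports.filter (fun imp => ((PySem.Str.split? imp ".").getD []).contains cm.1))).items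
            = (ks ++ [cm.1]).map (fun c => (c, pvM imports c)) := by
          rw [PySem.Dict.items_insert_of_not_contains d _ hc, hd]; simp [pvM]
        have hnd' : (ks ++ [cm.1]).Nodup := by
          simp [List.nodup_append, hnd]
          intro a ha he
          exact hm (he ▸ ha)
        rw [ih (ks ++ [cm.1]) _ hd' hnd']
        simp [PySem.Set.update, PySem.Set.add, hm]
    · rw [if_neg hv, if_neg hv]
      exact ih ks d hd hnd


lemma mainEq (jfp : String) (imports : List String) (mc : List (String × String)) :
    find_file_dependencies jfp imports mc = find_file_dependencies_alt jfp imports mc := by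
  have hA := phaseA imports mc [] PySem.Dict.empty rfl List.nodup_nil
  have h1 := phase1 mc [] PySem.Dict.empty rfl List.nodup_nil
  have hk : (mc.foldl
      (fun (deps : PySem.Dict String (List String)) cm =>
        if cm.1 != "unknown (local or implicit)" then deps.setdefault cm.1 [] else deps)
      PySem.Dict.empty).keys.Nodup := by
    simp only [PySem.Dict.keys, h1, List.map_map]
    have : List.map ((fun x => x.1) ∘ fun c => (c, ([] : List String)))
        (PySem.Set.update [] ((mc.map Prod.fst).filter (fun c => c != "unknown (local or implicit)")))
        = PySem.Set.update [] ((mc.map Prod.fst).filter (fun c => c != "unknown (local or implicit)")) :=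
      List.map_id _
    rw [this]
    exact PySem.Set.nodup_ofList _
  have h2 := phase2 imports _ hk
  show (mc.foldl
    (fun (dependencies : PySem.Dict String (List String)) cm =>
      if cm.1 != "unknown (local or implicit)" then
        let matching_imports := imports.filter (fun imp => ((PySem.Str.split? imp ".").getD []).contains cm.1)
        dependencies.insert cm.1 (if matching_imports.isEmpty then ["Unknown Source"] else matching_imports)
      else dependencies)
    PySem.Dict.empty).items
    = ((imports.foldl
      (fun (deps : PySem.Dict String (List String)) imp =>
        (PySem.List.dedup ((PySem.Str.split? imp ".").getD [])).foldl
          (fun deps tok =>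
            if deps.contains tok then deps.insert tok (deps.getD tok [] ++ [imp]) else deps)
          deps)
      (mc.foldl
        (fun (deps : PySem.Dict String (List String)) cm =>
          if cm.1 != "unknown (local or implicit)" then deps.setdefault cm.1 [] else deps)
        PySem.Dict.empty)).items).map (fun p => (p.1, if p.2.isEmpty then ["Unknown Source"] else p.2))
  rw [hA, h2, h1, List.map_map, List.map_map]
  exact List.map_congr_left (fun c _ => rfl)

-- ===== VERDICT (by name: the statement is the Claim_ definition above) =====
theorem find_file_dependencies_spec : Claim_equal_find_file_dependencies := by
  unfold Claim_equal_find_file_dependencies Spec_find_file_dependencies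
  intro java_file_path imports method_calls _
  exact mainEq java_file_path imports method_calls
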